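-- pv_equiv track=rewrite | github.com/jskim7018/leetcode_study | algorithm_study/2025/12/20251224/medium/LC_2001.py | interchangeableRectangles
-- ===== SOURCE A (Python) =====
-- from typing import List
-- from collections import defaultdict
-- import math
--
-- def interchangeableRectangles(rectangles: List[List[int]]) -> int:
--     counter = defaultdict(lambda:0)
--
--     for r in rectangles:
--         w = r[0]
--         h = r[1]
--         _gcd = math.gcd(w,h)
--         counter[(w//_gcd, h//_gcd)] += 1
--
--     ans = 0
--     for v in counter.values():
--         ans += (v*(v-1))//2
--     return ans
-- ===== SOURCE B (Python) =====
-- from typing import List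
-- import math
--
-- def _key(r):
--     g = math.gcd(r[0], r[1])
--     return (r[0] // g, r[1] // g)
--
-- def interchangeableRectangles(rectangles: List[List[int]]) -> int:
--     # Sort the reduced ratios: equal ratios become contiguous runs; count pairs run by run.
--     keys = sorted(_key(r) for r in rectangles)
--     ans = 0
--     prev = None
--     run = 0
--     for k in keys:
--         if k == prev:
--             run += 1
--         else:
--             ans += run * (run - 1) // 2
--             prev = k
--             run = 1
--     return ans + run * (run - 1) // 2
-- ===== Notes on version B (the rewrite author's own statement) =====
-- stated objective: alternative
-- what changed: Replaced A's hash-map grouping (a Counter of reduced ratios, then summing v*(v-1)//2 over its values) by sort-then-scan: the reduced ratio keys are sorted so equal ratios form contiguous runs, and a single linear scan over the sorted list accumulates run*(run-1)//2 per run — no dictionary at all.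
import Mathlib
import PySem

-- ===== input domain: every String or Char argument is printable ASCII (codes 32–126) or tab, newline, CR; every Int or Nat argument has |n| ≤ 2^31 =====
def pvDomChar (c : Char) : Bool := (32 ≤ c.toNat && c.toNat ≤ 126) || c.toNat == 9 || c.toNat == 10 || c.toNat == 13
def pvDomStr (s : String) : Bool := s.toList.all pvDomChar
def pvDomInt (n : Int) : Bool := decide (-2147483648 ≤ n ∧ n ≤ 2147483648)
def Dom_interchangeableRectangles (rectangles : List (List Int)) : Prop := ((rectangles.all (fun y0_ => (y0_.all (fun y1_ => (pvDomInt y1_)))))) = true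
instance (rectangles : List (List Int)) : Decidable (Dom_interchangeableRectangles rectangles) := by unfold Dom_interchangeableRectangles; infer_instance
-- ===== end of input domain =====

-- B replaces A's hash-map grouping (Counter of reduced ratios + Σ v*(v-1)//2 over its
-- values) by sort-then-scan: sort the reduced ratio keys so equal ratios are contiguous,
-- then one linear scan adds run*(run-1)//2 per run (objective: alternative, no dict).

-- Shared by both Pythons: the reduced-ratio key (w//gcd(w,h), h//gcd(w,h)) of a rectangle.
def keyOf (r : List Int) : Int × Int :=
  let w := PySem.List.pyGetD r 0 0
  let h := PySem.List.pyGetD r 1 0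
  let g : Int := (Int.gcd w h : Int)
  (PySem.Int.floordiv w g, PySem.Int.floordiv h g)

-- v*(v-1)//2, as both Pythons write it.
def c2 (v : Int) : Int := PySem.Int.floordiv (v * (v - 1)) 2

-- ===== PORT A =====
def interchangeableRectangles (rectangles : List (List Int)) : Int :=
  let counter := rectangles.foldl
    (fun (d : PySem.Dict (Int × Int) Int) r => d.modify (keyOf r) 0 (· + 1))
    PySem.Dict.empty
  counter.values.foldl (fun ans v => ans + PySem.Int.floordiv (v * (v - 1)) 2) 0

-- ===== PORT B =====
-- the loop body: state (prev, run, ans); 'if k == prev: run += 1 else: ans += c2 run; prev, run = k, 1'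
def scanStep (st : Option (Int × Int) × Int × Int) (k : Int × Int) : Option (Int × Int) × Int × Int :=
  if some k = st.1 then (st.1, st.2.1 + 1, st.2.2)
  else (some k, 1, st.2.2 + c2 st.2.1)

def interchangeableRectangles_alt (rectangles : List (List Int)) : Int :=
  let keys := PySem.List.sorted2 (rectangles.map keyOf) (fun p => p.1) (fun p => p.2)
  let st := keys.foldl scanStep (none, 0, 0)
  st.2.2 + c2 st.2.1

-- ===== PRECONDITION & SPEC =====
-- Pre_ excludes exactly the inputs where the Python A raises: a rectangle with fewer than
-- two entries (IndexError) or a [0, 0] rectangle (gcd = 0, ZeroDivisionError).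
def Pre_interchangeableRectangles (rectangles : List (List Int)) : Prop :=
  ∀ r ∈ rectangles, 2 ≤ r.length ∧ ¬(r.getD 0 0 = 0 ∧ r.getD 1 0 = 0)
instance (rectangles : List (List Int)) : Decidable (Pre_interchangeableRectangles rectangles) := by
  unfold Pre_interchangeableRectangles; infer_instance

def pvWitness_interchangeableRectangles : List (List Int) := [[4, 8], [3, 6], [10, 20], [15, 30]]

def Spec_interchangeableRectangles (rectangles : List (List Int)) (out : Int) : Prop :=
  out = interchangeableRectangles_alt rectangles
instance (rectangles : List (List Int)) (out : Int) : Decidable (Spec_interchangeableRectangles rectangles out) := by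
  unfold Spec_interchangeableRectangles; infer_instance

-- ===== CLAIM =====
def Claim_equal_interchangeableRectangles : Prop :=
  ∀ (rectangles : List (List Int)), Dom_interchangeableRectangles rectangles →
    Pre_interchangeableRectangles rectangles →
      Spec_interchangeableRectangles rectangles (interchangeableRectangles rectangles)

-- ===== LEMMAS AND PROOFS =====

-- The lexicographic order Python uses on pairs, and sorted2's comparison function.
def lexLe (a b : Int × Int) : Prop := a.1 < b.1 ∨ (a.1 = b.1 ∧ a.2 ≤ b.2)

def lexBefore (a b : Int × Int) : Bool :=
  decide (a.1 < b.1) || (!decide (b.1 < a.1) && decide (a.2 < b.2))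

lemma lexLe_of_before {a b : Int × Int} (h : lexBefore a b = true) : lexLe a b := by
  unfold lexBefore at h; unfold lexLe
  rcases a with ⟨a1, a2⟩; rcases b with ⟨b1, b2⟩
  simp at h ⊢; omega

lemma lexLe_of_not_before {a b : Int × Int} (h : lexBefore a b = false) : lexLe b a := by
  unfold lexBefore at h; unfold lexLe
  rcases a with ⟨a1, a2⟩; rcases b with ⟨b1, b2⟩
  simp at h ⊢; omega

lemma lexLe_trans {a b c : Int × Int} (h1 : lexLe a b) (h2 : lexLe b c) : lexLe a c := by
  unfold lexLe at *; omega

lemma lexLe_antisymm {a b : Int × Int} (h1 : lexLe a b) (h2 : lexLe b a) : a = b := by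
  unfold lexLe at *
  rcases a with ⟨a1, a2⟩; rcases b with ⟨b1, b2⟩
  simp at *; omega

lemma insertBy_pairwise_lex (x : Int × Int) :
    ∀ (ys : List (Int × Int)), ys.Pairwise lexLe →
      (PySem.List.insertBy lexBefore x ys).Pairwise lexLe := by
  intro ys
  induction ys with
  | nil => intro _; simp [PySem.List.insertBy]
  | cons y t ih =>
    intro hp
    rw [List.pairwise_cons] at hp
    simp only [PySem.List.insertBy]
    by_cases hb : lexBefore x y = true
    · rw [if_pos hb]
      refine List.pairwise_cons.mpr ⟨?_, List.pairwise_cons.mpr hp⟩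
      intro z hz
      rcases List.mem_cons.mp hz with rfl | hzt
      · exact lexLe_of_before hb
      · exact lexLe_trans (lexLe_of_before hb) (hp.1 z hzt)
    · rw [if_neg hb]
      refine List.pairwise_cons.mpr ⟨?_, ih hp.2⟩
      intro z hz
      rcases (PySem.List.mem_insertBy _ _ _ _).mp hz with rfl | hzt
      · exact lexLe_of_not_before (by simpa using hb)
      · exact hp.1 z hzt

lemma foldl_insertBy_pairwise (xs : List (Int × Int)) :
    ∀ (acc : List (Int × Int)), acc.Pairwise lexLe →
      (xs.foldl (fun acc x => PySem.List.insertBy lexBefore x acc) acc).Pairwise lexLe := by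
  induction xs with
  | nil => intro acc h; simpa using h
  | cons x t ih =>
    intro acc h
    simpa using ih _ (insertBy_pairwise_lex x acc h)

lemma sorted2_eq_foldl (xs : List (Int × Int)) :
    PySem.List.sorted2 xs (fun p => p.1) (fun p => p.2)
      = xs.foldl (fun acc x => PySem.List.insertBy lexBefore x acc) [] := rfl

lemma sorted2_pairwise_lex (xs : List (Int × Int)) :
    (PySem.List.sorted2 xs (fun p => p.1) (fun p => p.2)).Pairwise lexLe := by
  rw [sorted2_eq_foldl]
  exact foldl_insertBy_pairwise xs [] (by simp)

-- The canonical quantity both programs compute: Σ over distinct keys of C(count, 2).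
def F (l : List (Int × Int)) : Int := ∑ k ∈ l.toFinset, c2 (l.count k)

lemma F_perm {l₁ l₂ : List (Int × Int)} (h : l₁.Perm l₂) : F l₁ = F l₂ := by
  unfold F
  rw [List.toFinset_eq_of_perm _ _ h]
  exact Finset.sum_congr rfl (fun k _ => by rw [h.count_eq])

lemma F_replicate_append (a : Int × Int) (r : Nat) (hr : 1 ≤ r)
    (m : List (Int × Int)) (hm : a ∉ m) :
    F (List.replicate r a ++ m) = c2 (r : Int) + F m := by
  unfold F
  have hfs : (List.replicate r a ++ m).toFinset = insert a m.toFinset := by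
    rw [List.toFinset_append, List.toFinset_replicate_of_ne_zero (by omega)]
    rfl
  rw [hfs, Finset.sum_insert (by simpa using hm)]
  congr 1
  · congr 1
    rw [List.count_append, List.count_replicate_self,
        List.count_eq_zero_of_not_mem hm]
    simp
  · apply Finset.sum_congr rfl
    intro k hk
    have hka : k ≠ a := fun h => hm (h ▸ List.mem_toFinset.mp hk)
    congr 1
    rw [List.count_append, List.count_replicate]
    simp [Ne.symm hka]

lemma scan_inv (l : List (Int × Int)) :
    ∀ (a : Int × Int) (r : Nat) (ans : Int), 1 ≤ r →
      l.Pairwise lexLe → (∀ k ∈ l, lexLe a k) →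
      (l.foldl scanStep (some a, (r : Int), ans)).2.2
          + c2 ((l.foldl scanStep (some a, (r : Int), ans)).2.1)
        = ans + F (List.replicate r a ++ l) := by
  induction l with
  | nil =>
    intro a r ans hr _ _
    simp only [List.foldl_nil]
    rw [List.append_nil, show List.replicate r a = List.replicate r a ++ ([] : List (Int × Int)) from (List.append_nil _).symm, F_replicate_append a r hr [] (by simp)]
    simp [F]
  | cons k t ih =>
    intro a r ans hr hp hle
    rw [List.pairwise_cons] at hp
    simp only [List.foldl_cons]
    by_cases hk : k = a
    · rw [show scanStep (some a, (r : Int), ans) k = (some a, (r : Int) + 1, ans) from by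
        simp [scanStep, hk]]
      rw [show ((r : Int) + 1) = ((r + 1 : Nat) : Int) from by push_cast; ring]
      rw [ih a (r + 1) ans (by omega) hp.2
            (fun x hx => hk ▸ hp.1 x hx)]
      congr 1
      have : List.replicate r a ++ k :: t = List.replicate (r + 1) a ++ t := by
        rw [List.replicate_succ', List.append_assoc, hk]
        rfl
      rw [this]
    · rw [show scanStep (some a, (r : Int), ans) k
            = (some k, ((1 : Nat) : Int), ans + c2 (r : Int)) by
        simp [scanStep, hk]]
      rw [ih k 1 (ans + c2 (r : Int)) (by omega) hp.2 hp.1]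
      have hanotin : a ∉ k :: t := by
        intro hmem
        rcases List.mem_cons.mp hmem with h | h
        · exact hk h.symm
        · exact hk (lexLe_antisymm (hp.1 a h) (hle k List.mem_cons_self))
      rw [F_replicate_append a r hr (k :: t) hanotin]
      have : List.replicate 1 k ++ t = k :: t := by simp
      rw [this]
      ring

lemma c2_zero : c2 0 = 0 := by decide

lemma alt_eq_F (rectangles : List (List Int)) :
    interchangeableRectangles_alt rectangles = F (rectangles.map keyOf) := by
  unfold interchangeableRectangles_alt
  have hperm := PySem.List.sorted2_perm (rectangles.map keyOf)
    (fun p : Int × Int => p.1) (fun p => p.2) false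
  rw [← F_perm hperm]
  have hp := sorted2_pairwise_lex (rectangles.map keyOf)
  cases hs : PySem.List.sorted2 (rectangles.map keyOf) (fun p => p.1) (fun p => p.2) with
  | nil => simp [F, c2_zero]
  | cons k t =>
    rw [hs] at hp
    rw [List.pairwise_cons] at hp
    simp only [List.foldl_cons]
    rw [show scanStep (none, 0, 0) k = (some k, ((1 : Nat) : Int), 0 + c2 0) by
      simp [scanStep]]
    rw [scan_inv t k 1 (0 + c2 0) (by omega) hp.2 hp.1]
    simp [c2_zero]

lemma a_eq_F (rectangles : List (List Int)) :
    interchangeableRectangles rectangles = F (rectangles.map keyOf) := by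
  unfold interchangeableRectangles
  rw [show (rectangles.foldl
      (fun (d : PySem.Dict (Int × Int) Int) r => d.modify (keyOf r) 0 (· + 1))
      PySem.Dict.empty) = PySem.Dict.counter (rectangles.map keyOf) by
    rw [PySem.Dict.counter_eq_foldl, List.foldl_map]]
  rw [PySem.List.foldl_add _ (fun v => PySem.Int.floordiv (v * (v - 1)) 2) 0,
      PySem.Dict.values_eq_map_keys _ (PySem.Dict.nodup_keys_counter _) 0,
      PySem.Dict.keys_counter]
  simp only [List.map_map, zero_add]
  have hmap : ((PySem.Set.ofList (rectangles.map keyOf)).map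
        ((fun v => PySem.Int.floordiv (v * (v - 1)) 2) ∘
          fun j => (PySem.Dict.counter (rectangles.map keyOf)).getD j 0))
      = (PySem.Set.ofList (rectangles.map keyOf)).map
          (fun k => c2 ((rectangles.map keyOf).count k)) := by
    apply List.map_congr_left
    intro k _
    simp [Function.comp, PySem.Dict.getD_counter, c2]
  rw [hmap]
  unfold F
  rw [← List.sum_toFinset _ (PySem.Set.nodup_ofList _)]
  apply Finset.sum_congr
  · apply Finset.ext
    intro k
    simp [PySem.Set.mem_ofList]
  · intro k _; rfl

-- ===== VERDICT =====
theorem interchangeableRectangles_spec : Claim_equal_interchangeableRectangles := by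
  intro rectangles _ _
  unfold Spec_interchangeableRectangles
  rw [a_eq_F, alt_eq_F]
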